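-- pv_equiv track=rewrite | github.com/priyanshusinghal12/ReqCheck | backend/course_logic/helper.py | refine_courses
-- ===== SOURCE A (Python) =====
-- def refine_courses(student_courses, dont_remove=[]):
--     # Replace "SPCOM" with "COMMST" in student_courses
--     for i in range(len(student_courses)):
--         if student_courses[i].startswith("SPCOM"):
--             student_courses[i] = student_courses[i].replace("SPCOM", "COMMST")
--
--     # Lists defined within the function
--     math_core_courses = [
--         "CS 115", "CS 135", "CS 145",
--         "CS 116", "CS 136", "CS 146", "CS 136L",
--         "MATH 106", "MATH 136", "MATH 146",
--         "MATH 127", "MATH 137", "MATH 147",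
--         "MATH 128", "MATH 138", "MATH 148",
--         "MATH 135", "MATH 145",
--         "MATH 235", "MATH 245",
--         "MATH 237", "MATH 239", "MATH 247", "MATH 249",
--         "STAT 230", "STAT 240",
--         "STAT 231", "STAT 241"
--     ]
--
--     list_1 = [
--         "COMMST 100",
--         "COMMST 223",
--         "EMLS 101R",
--         "EMLS 102R",
--         "EMLS 129R",
--         "ENGL 109",
--         "ENGL 129R"
--     ]
--
--     list_1_and_2 = [
--         "COMMST 100",
--         "COMMST 223",
--         "EMLS 101R",
--         "EMLS 102R",
--         "EMLS 129R",
--         "ENGL 109",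
--         "ENGL 129R",
--         "COMMST 225",
--         "COMMST 227",
--         "COMMST 228",
--         "EMLS 103R",
--         "EMLS 104R",
--         "EMLS 110R",
--         "ENGL 101B",
--         "ENGL 108B",
--         "ENGL 108D",
--         "ENGL 119",
--         "ENGL 208B",
--         "ENGL 209",
--         "ENGL 210E",
--         "ENGL 210F",
--         "ENGL 378",
--         "MTHEL 300"
--     ]
--
--     # Remove all courses from math_core_courses (unless in dont_remove)
--     for course in math_core_courses:
--         if course in student_courses and course not in dont_remove:
--             student_courses.remove(course)
--
--     # Remove exactly one course from list_1 if present (unless in dont_remove)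
--     for course in list_1:
--         if course in student_courses and course not in dont_remove:
--             student_courses.remove(course)
--             break  # remove only one course from list_1
--
--     # Remove exactly one course from list_1_and_2 if present (unless in dont_remove)
--     for course in list_1_and_2:
--         if course in student_courses and course not in dont_remove:
--             student_courses.remove(course)
--             break  # remove only one course from list_1_and_2
--
--     # Remove any courses with codes "COOP" or "PD"
--     student_courses[:] = [
--         course for course in student_courses
--         if not (course.startswith("COOP") or course.startswith("PD"))
--     ]
--
--     return student_courses
-- ===== SOURCE B (Python) =====
-- MATH_CORE_COURSES = [
--     "CS 115", "CS 135", "CS 145",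
--     "CS 116", "CS 136", "CS 146", "CS 136L",
--     "MATH 106", "MATH 136", "MATH 146",
--     "MATH 127", "MATH 137", "MATH 147",
--     "MATH 128", "MATH 138", "MATH 148",
--     "MATH 135", "MATH 145",
--     "MATH 235", "MATH 245",
--     "MATH 237", "MATH 239", "MATH 247", "MATH 249",
--     "STAT 230", "STAT 240",
--     "STAT 231", "STAT 241",
-- ]
--
-- LIST_1 = [
--     "COMMST 100", "COMMST 223", "EMLS 101R", "EMLS 102R",
--     "EMLS 129R", "ENGL 109", "ENGL 129R",
-- ]
--
-- LIST_1_AND_2 = LIST_1 + [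
--     "COMMST 225", "COMMST 227", "COMMST 228",
--     "EMLS 103R", "EMLS 104R", "EMLS 110R",
--     "ENGL 101B", "ENGL 108B", "ENGL 108D", "ENGL 119",
--     "ENGL 208B", "ENGL 209", "ENGL 210E", "ENGL 210F",
--     "ENGL 378", "MTHEL 300",
-- ]
--
--
-- def refine_courses(student_courses, dont_remove=[]):
--     renamed = [c.replace("SPCOM", "COMMST") if c.startswith("SPCOM") else c
--                for c in student_courses]
--
--     # Plan every deletion first: one pending deletion per eligible math-core
--     # course, plus at most one from LIST_1 and one from LIST_1_AND_2.
--     to_remove = []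
--     for course in MATH_CORE_COURSES:
--         if renamed.count(course) > to_remove.count(course) and course not in dont_remove:
--             to_remove.append(course)
--     for course in LIST_1:
--         if renamed.count(course) > to_remove.count(course) and course not in dont_remove:
--             to_remove.append(course)
--             break
--     for course in LIST_1_AND_2:
--         if renamed.count(course) > to_remove.count(course) and course not in dont_remove:
--             to_remove.append(course)
--             break
--
--     # Single pass: honour each pending deletion on its first remaining
--     # occurrence, and drop COOP/PD courses.
--     result = []
--     for course in renamed:
--         if course in to_remove:
--             to_remove.remove(course)
--         elif not (course.startswith("COOP") or course.startswith("PD")):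
--             result.append(course)
--
--     student_courses[:] = result
--     return student_courses
-- ===== Notes on version B (the rewrite author's own statement) =====
-- stated objective: alternative
-- what changed: B plans all deletions first (one per eligible math-core course plus at most one each from list_1 and list_1_and_2, using count comparisons against the plan) and then rebuilds the list in a single pass that skips each planned course's first remaining occurrence and drops COOP/PD courses, instead of A's repeated membership-scan-plus-.remove mutations followed by a separate filter pass.
import Mathlib
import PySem

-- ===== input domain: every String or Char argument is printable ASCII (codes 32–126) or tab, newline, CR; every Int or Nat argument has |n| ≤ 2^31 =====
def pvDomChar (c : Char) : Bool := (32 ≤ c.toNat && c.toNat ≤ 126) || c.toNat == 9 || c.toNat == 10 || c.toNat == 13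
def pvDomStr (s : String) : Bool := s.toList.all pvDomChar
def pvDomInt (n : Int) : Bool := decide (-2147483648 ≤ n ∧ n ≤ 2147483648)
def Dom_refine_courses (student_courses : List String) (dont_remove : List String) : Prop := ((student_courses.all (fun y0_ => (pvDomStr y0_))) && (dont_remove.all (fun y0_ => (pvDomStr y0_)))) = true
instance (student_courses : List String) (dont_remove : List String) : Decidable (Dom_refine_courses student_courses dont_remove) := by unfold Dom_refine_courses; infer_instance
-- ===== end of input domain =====

-- B plans all deletions first and rebuilds the list in one pass instead of A's repeated
-- membership-scan-plus-.remove passes over the student list (objective: alternative; return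
-- value only — both Pythons mutate student_courses in place, B via one final slice assignment).

-- shared course-name constants (module-level in B, function-local literals in A)
def mathCoreCourses : List String := [
  "CS 115", "CS 135", "CS 145",
  "CS 116", "CS 136", "CS 146", "CS 136L",
  "MATH 106", "MATH 136", "MATH 146",
  "MATH 127", "MATH 137", "MATH 147",
  "MATH 128", "MATH 138", "MATH 148",
  "MATH 135", "MATH 145",
  "MATH 235", "MATH 245",
  "MATH 237", "MATH 239", "MATH 247", "MATH 249",
  "STAT 230", "STAT 240",
  "STAT 231", "STAT 241"]

def list1Courses : List String := [
  "COMMST 100", "COMMST 223", "EMLS 101R", "EMLS 102R",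
  "EMLS 129R", "ENGL 109", "ENGL 129R"]

def list1And2Courses : List String := list1Courses ++ [
  "COMMST 225", "COMMST 227", "COMMST 228",
  "EMLS 103R", "EMLS 104R", "EMLS 110R",
  "ENGL 101B", "ENGL 108B", "ENGL 108D", "ENGL 119",
  "ENGL 208B", "ENGL 209", "ENGL 210E", "ENGL 210F",
  "ENGL 378", "MTHEL 300"]

-- the SPCOM -> COMMST rename both versions apply to each element
def renameCourse (c : String) : String :=
  if PySem.Str.startswith c "SPCOM" then PySem.Str.replace c "SPCOM" "COMMST" else c

-- ys.remove(c) (both Pythons only call it when c is present, so the getD arm is dead)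
def pyRemove (ys : List String) (c : String) : List String :=
  (PySem.List.remove? ys c).getD ys

-- COOP/PD filter predicate shared by A's comprehension and B's final pass
def keepCourse (c : String) : Bool :=
  !(PySem.Str.startswith c "COOP" || PySem.Str.startswith c "PD")

-- ===== PORT A =====
-- A's two break-out loops: remove the first eligible course of `courses`, then stop
def removeOneOf (courses : List String) (dr : List String) (ys : List String) : List String :=
  match courses with
  | [] => ys
  | c :: cs => if c ∈ ys ∧ c ∉ dr then pyRemove ys c else removeOneOf cs dr ys

def refine_courses (student_courses : List String) (dont_remove : List String) : List String :=
  let renamed := student_courses.map renameCourse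
  let ys1 := mathCoreCourses.foldl
    (fun ys c => if c ∈ ys ∧ c ∉ dont_remove then pyRemove ys c else ys) renamed
  let ys2 := removeOneOf list1Courses dont_remove ys1
  let ys3 := removeOneOf list1And2Courses dont_remove ys2
  ys3.filter keepCourse

-- ===== PORT B =====
-- B's two break-out planning loops: append the first eligible course to the plan, then stop
def pickOne (courses : List String) (ren dr tr : List String) : List String :=
  match courses with
  | [] => tr
  | c :: cs =>
    if PySem.List.count tr c < PySem.List.count ren c ∧ c ∉ dr then tr ++ [c]
    else pickOne cs ren dr tr

-- B's single rebuild pass: honour one pending deletion per planned occurrence, drop COOP/PD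
def sweep (tr xs : List String) : List String :=
  match xs with
  | [] => []
  | c :: rest =>
    if c ∈ tr then sweep (pyRemove tr c) rest
    else if keepCourse c then c :: sweep tr rest
    else sweep tr rest

def refine_courses_alt (student_courses : List String) (dont_remove : List String) : List String :=
  let renamed := student_courses.map renameCourse
  let tr1 := mathCoreCourses.foldl
    (fun tr c => if PySem.List.count tr c < PySem.List.count renamed c ∧ c ∉ dont_remove
                 then tr ++ [c] else tr) []
  let tr2 := pickOne list1Courses renamed dont_remove tr1
  let tr3 := pickOne list1And2Courses renamed dont_remove tr2
  sweep tr3 renamed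

-- ===== PRECONDITION & SPEC =====
def Spec_refine_courses (student_courses : List String) (dont_remove : List String) (out : List String) : Prop := out = refine_courses_alt student_courses dont_remove
instance (student_courses : List String) (dont_remove : List String) (out : List String) : Decidable (Spec_refine_courses student_courses dont_remove out) := by unfold Spec_refine_courses; infer_instance

-- ===== CLAIM (what is proved, stated in full; the proofs are below) =====
def Claim_equal_refine_courses : Prop := ∀ (student_courses : List String) (dont_remove : List String), Dom_refine_courses student_courses dont_remove → Spec_refine_courses student_courses dont_remove (refine_courses student_courses dont_remove)

-- ===== LEMMAS AND PROOFS =====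

-- proof-only model: result of deleting, for each planned course, its first remaining occurrence
def skipAll (tr xs : List String) : List String :=
  match xs with
  | [] => []
  | x :: rest => if x ∈ tr then skipAll (tr.erase x) rest else x :: skipAll tr rest

theorem skipAll_nil (xs : List String) : skipAll [] xs = xs := by
  induction xs with
  | nil => rfl
  | cons x rest ih => simp [skipAll, ih]

theorem mem_skipAll (c : String) : ∀ (xs tr : List String),
    c ∈ skipAll tr xs ↔ tr.count c < xs.count c := by
  intro xs
  induction xs with
  | nil => intro tr; simp [skipAll]
  | cons x rest ih =>
    intro tr
    by_cases hx : x ∈ tr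
    · rw [skipAll, if_pos hx, ih]
      by_cases hc : x = c
      · subst hc
        have h1 : 1 ≤ tr.count x := List.one_le_count_iff.mpr hx
        simp only [List.count_erase_self, List.count_cons_self]
        omega
      · have hbc : (x == c) = false := beq_eq_false_iff_ne.mpr hc
        rw [List.count_erase_of_ne (fun h => hc h.symm)]
        simp [List.count_cons, hbc]
    · rw [skipAll, if_neg hx]
      by_cases hc : x = c
      · subst hc
        have h0 : tr.count x = 0 := List.count_eq_zero.mpr hx
        simp [List.count_cons_self, h0]
      · have hbc : (x == c) = false := beq_eq_false_iff_ne.mpr hc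
        simp only [List.mem_cons, ih, List.count_cons, hbc]
        exact or_iff_right (fun h => hc h.symm)

theorem pyRemove_of_mem {c : String} {ys : List String} (h : c ∈ ys) :
    pyRemove ys c = ys.erase c := by
  simp [pyRemove, PySem.List.remove?_eq_some_erase ys c h]

theorem erase_skipAll (c : String) : ∀ (xs tr : List String), tr.count c < xs.count c →
    (skipAll tr xs).erase c = skipAll (tr ++ [c]) xs := by
  intro xs
  induction xs with
  | nil => intro tr h; simp [List.count_nil] at h
  | cons x rest ih =>
    intro tr h
    by_cases hx : x ∈ tr
    · have hx' : x ∈ tr ++ [c] := List.mem_append_left _ hx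
      rw [skipAll, if_pos hx, skipAll, if_pos hx', List.erase_append_left _ hx]
      apply ih
      by_cases hc : x = c
      · subst hc
        have h1 : 1 ≤ tr.count x := List.one_le_count_iff.mpr hx
        rw [List.count_erase_self]
        simp only [List.count_cons_self] at h
        omega
      · have hbc : (x == c) = false := beq_eq_false_iff_ne.mpr hc
        rw [List.count_erase_of_ne (fun h' => hc h'.symm)]
        simpa [List.count_cons, hbc] using h
    · by_cases hc : x = c
      · subst hc
        have h0 : x ∉ tr := hx
        rw [skipAll, if_neg hx]
        have : x ∈ tr ++ [x] := List.mem_append_right _ (by simp)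
        rw [skipAll, if_pos this, List.erase_append_right _ h0, List.erase_cons_head]
        simp
      · have hx' : x ∉ tr ++ [c] := by
          simp [hx, hc]
        have hbc : (x == c) = false := beq_eq_false_iff_ne.mpr hc
        rw [skipAll, if_neg hx, skipAll, if_neg hx',
            List.erase_cons_tail (by simp [hbc])]
        have h' : tr.count c < rest.count c := by
          simpa [List.count_cons, hbc] using h
        rw [ih tr h']

theorem pyRemove_skipAll {c : String} {xs tr : List String} (h : tr.count c < xs.count c) :
    pyRemove (skipAll tr xs) c = skipAll (tr ++ [c]) xs := by
  rw [pyRemove_of_mem ((mem_skipAll c xs tr).mpr h), erase_skipAll c xs tr h]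

-- the two phase conditions agree under the skipAll correspondence
theorem cond_iff (c : String) (xs tr : List String) :
    (c ∈ skipAll tr xs) ↔ PySem.List.count tr c < PySem.List.count xs c := by
  rw [mem_skipAll, PySem.List.count_eq, PySem.List.count_eq]

-- A's full math-core removal loop matches B's planning fold
theorem fold_phase (ren dr : List String) : ∀ (cs tr : List String),
    cs.foldl (fun ys c => if c ∈ ys ∧ c ∉ dr then pyRemove ys c else ys) (skipAll tr ren)
      = skipAll (cs.foldl (fun tr c =>
          if PySem.List.count tr c < PySem.List.count ren c ∧ c ∉ dr
          then tr ++ [c] else tr) tr) ren := by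
  intro cs
  induction cs with
  | nil => intro tr; simp
  | cons c cs ih =>
    intro tr
    simp only [List.foldl_cons]
    by_cases hd : c ∈ dr
    · rw [if_neg (by simp [hd]), if_neg (by simp [hd]), ih]
    · by_cases hm : c ∈ skipAll tr ren
      · have hcnt := (mem_skipAll c ren tr).mp hm
        rw [if_pos ⟨hm, hd⟩,
            if_pos ⟨by rw [PySem.List.count_eq, PySem.List.count_eq]; exact hcnt, hd⟩,
            pyRemove_skipAll hcnt, ih]
      · rw [if_neg (fun h => hm h.1),
            if_neg (fun h => hm ((cond_iff c ren tr).mpr h.1)), ih]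

-- A's break-out removal loop matches B's break-out planning loop
theorem pick_phase (ren dr : List String) : ∀ (cs tr : List String),
    removeOneOf cs dr (skipAll tr ren) = skipAll (pickOne cs ren dr tr) ren := by
  intro cs
  induction cs with
  | nil => intro tr; rfl
  | cons c cs ih =>
    intro tr
    rw [removeOneOf, pickOne]
    by_cases hd : c ∈ dr
    · rw [if_neg (by simp [hd]), if_neg (by simp [hd]), ih]
    · by_cases hm : c ∈ skipAll tr ren
      · have hcnt := (mem_skipAll c ren tr).mp hm
        rw [if_pos ⟨hm, hd⟩,
            if_pos ⟨by rw [PySem.List.count_eq, PySem.List.count_eq]; exact hcnt, hd⟩,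
            pyRemove_skipAll hcnt]
      · rw [if_neg (fun h => hm h.1),
            if_neg (fun h => hm ((cond_iff c ren tr).mpr h.1)), ih]

-- B's single rebuild pass = the planned deletions followed by the COOP/PD filter
theorem sweep_eq_filter_skipAll : ∀ (xs tr : List String),
    sweep tr xs = (skipAll tr xs).filter keepCourse := by
  intro xs
  induction xs with
  | nil => intro tr; rfl
  | cons x rest ih =>
    intro tr
    by_cases hx : x ∈ tr
    · rw [sweep, if_pos hx, skipAll, if_pos hx, pyRemove_of_mem hx, ih]
    · rw [sweep, if_neg hx, skipAll, if_neg hx]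
      by_cases hk : keepCourse x = true
      · rw [if_pos hk, ih, List.filter_cons_of_pos hk]
      · rw [if_neg hk, ih, List.filter_cons_of_neg (by simpa using hk)]

-- ===== VERDICT (by name: the statement is the Claim_ definition above) =====
theorem refine_courses_spec : Claim_equal_refine_courses := by
  intro sc dr _
  show refine_courses sc dr = refine_courses_alt sc dr
  simp only [refine_courses, refine_courses_alt]
  conv_lhs => rw [show (sc.map renameCourse) = skipAll [] (sc.map renameCourse) from
    (skipAll_nil _).symm]
  rw [fold_phase, pick_phase, pick_phase, sweep_eq_filter_skipAll]
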